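-- pv_equiv track=rewrite | github.com/Mvgrillo1357/Q-Nurse | xml_scheduler.py | check_minimum_consecutive
-- ===== SOURCE A (Python) =====
-- def check_minimum_consecutive(num_of_shift_types, dayOff, *args):
--     """
--     Pass labels from value + 1 days in *args.
--     dayOff - True if it's minimum consecutive days off
--     """
--     args = list(args[0])
--     begin = False
--     count = 0
--     for i in range(0, len(args), num_of_shift_types):
--         if begin:
--             count += 1
--         if sum(args[i:i+num_of_shift_types]) == dayOff:
--             if not begin:
--                 begin = True
--             elif count > 1:
--                 return False
--     return True
-- ===== SOURCE B (Python) =====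
-- def check_minimum_consecutive(num_of_shift_types, dayOff, *args):
--     args = list(args[0])
--     hits = [j for j in range(0, len(args), num_of_shift_types)
--             if sum(args[j:j + num_of_shift_types]) == dayOff]
--     return (not hits) or max(hits) - min(hits) <= num_of_shift_types
-- ===== Notes on version B (the rewrite author's own statement) =====
-- stated objective: alternative
-- what changed: Replaces A's stateful begin/count accept-reject scan with early return by a single comprehension collecting the chunk indices whose sum matches, followed by a span test max(hits)-min(hits) <= num_of_shift_types; Pre_ excludes num_of_shift_types = 0, where both programs raise ValueError from range's zero step.
import Mathlib
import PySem

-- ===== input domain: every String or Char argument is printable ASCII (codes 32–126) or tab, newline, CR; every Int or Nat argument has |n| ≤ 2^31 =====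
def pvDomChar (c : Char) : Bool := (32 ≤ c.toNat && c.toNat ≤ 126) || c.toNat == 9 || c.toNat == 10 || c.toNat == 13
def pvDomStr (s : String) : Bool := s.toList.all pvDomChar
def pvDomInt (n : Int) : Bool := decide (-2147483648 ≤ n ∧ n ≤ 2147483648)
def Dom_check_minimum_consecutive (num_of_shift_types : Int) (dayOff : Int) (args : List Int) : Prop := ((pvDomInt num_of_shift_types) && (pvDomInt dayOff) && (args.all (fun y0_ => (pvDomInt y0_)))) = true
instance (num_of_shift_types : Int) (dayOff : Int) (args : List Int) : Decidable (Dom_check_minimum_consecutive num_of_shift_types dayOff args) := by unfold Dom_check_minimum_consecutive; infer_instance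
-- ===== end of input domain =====

-- B replaces A's stateful begin/count scan by collecting the matching chunk indices and
-- comparing their span to the chunk step (objective: alternative decomposition, same cost).

-- ===== PORT A =====
-- A's for-loop over range(0, len(args), num_of_shift_types) with state (begin, count) and early return False
def pvLoopA (num_of_shift_types : Int) (dayOff : Int) (args : List Int) :
    List Int → Bool → Int → Bool
  | [], _, _ => true
  | i :: rest, bg, count =>
    let count' := if bg then count + 1 else count
    if decide ((PySem.List.slice args (some i) (some (i + num_of_shift_types))).sum = dayOff) then
      if !bg then pvLoopA num_of_shift_types dayOff args rest true count'
      else if count' > 1 then false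
      else pvLoopA num_of_shift_types dayOff args rest bg count'
    else pvLoopA num_of_shift_types dayOff args rest bg count'

def check_minimum_consecutive (num_of_shift_types : Int) (dayOff : Int) (args : List Int) : Bool :=
  pvLoopA num_of_shift_types dayOff args
    (PySem.List.pyRange 0 (PySem.List.len args) num_of_shift_types) false 0

-- ===== PORT B =====
-- '(not hits) or max(hits) - min(hits) <= num_of_shift_types' (max?/min? are none exactly when hits = [])
def pvSpan (num_of_shift_types : Int) (hits : List Int) : Bool :=
  match PySem.List.max? hits (fun x => x), PySem.List.min? hits (fun x => x) with
  | some mx, some mn => decide (mx - mn ≤ num_of_shift_types)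
  | _, _ => true

def check_minimum_consecutive_alt (num_of_shift_types : Int) (dayOff : Int) (args : List Int) : Bool :=
  pvSpan num_of_shift_types
    ((PySem.List.pyRange 0 (PySem.List.len args) num_of_shift_types).filter
      (fun j => decide ((PySem.List.slice args (some j) (some (j + num_of_shift_types))).sum = dayOff)))

-- ===== PRECONDITION & SPEC =====
-- Pre_ excludes num_of_shift_types = 0: there range(0, len, 0) raises ValueError in both A and B.
def Pre_check_minimum_consecutive (num_of_shift_types : Int) (dayOff : Int) (args : List Int) : Prop :=
  num_of_shift_types ≠ 0
instance (num_of_shift_types : Int) (dayOff : Int) (args : List Int) : Decidable (Pre_check_minimum_consecutive num_of_shift_types dayOff args) := by unfold Pre_check_minimum_consecutive; infer_instance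

def pvWitness_check_minimum_consecutive : Int × Int × List Int := (1, 1, [1, 0, 1])

def Spec_check_minimum_consecutive (num_of_shift_types : Int) (dayOff : Int) (args : List Int) (out : Bool) : Prop := out = check_minimum_consecutive_alt num_of_shift_types dayOff args
instance (num_of_shift_types : Int) (dayOff : Int) (args : List Int) (out : Bool) : Decidable (Spec_check_minimum_consecutive num_of_shift_types dayOff args out) := by unfold Spec_check_minimum_consecutive; infer_instance

-- ===== CLAIM (what is proved, stated in full; the proofs are below) =====
def Claim_equal_check_minimum_consecutive : Prop := ∀ (num_of_shift_types : Int) (dayOff : Int) (args : List Int), Dom_check_minimum_consecutive num_of_shift_types dayOff args → Pre_check_minimum_consecutive num_of_shift_types dayOff args → Spec_check_minimum_consecutive num_of_shift_types dayOff args (check_minimum_consecutive num_of_shift_types dayOff args)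

-- ===== LEMMAS AND PROOFS =====

-- abbreviation used only by the proofs: does chunk j match
def pvHit (num_of_shift_types : Int) (dayOff : Int) (args : List Int) (j : Int) : Bool :=
  decide ((PySem.List.slice args (some j) (some (j + num_of_shift_types))).sum = dayOff)

-- after begin, with count already >= 1, A returns true iff no further chunk matches
theorem pvLoopA_true_ge_one (num dayOff : Int) (args : List Int) :
    ∀ (l : List Int) (c : Int), 1 ≤ c →
      pvLoopA num dayOff args l true c = l.all (fun i => !pvHit num dayOff args i) := by
  intro l
  induction l with
  | nil => intro c _; rfl
  | cons i rest ih =>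
    intro c hc
    simp only [pvLoopA, List.all_cons]
    by_cases hp : (PySem.List.slice args (some i) (some (i + num))).sum = dayOff
    · simp [pvHit, hp, show c + 1 > 1 by omega]
    · simp [pvHit, hp, ih (c + 1) (by omega)]

-- right after begin (count = 0), the immediately-next chunk may match; later ones may not
theorem pvLoopA_true_zero (num dayOff : Int) (args : List Int) :
    ∀ l : List Int,
      pvLoopA num dayOff args l true 0 = l.tail.all (fun i => !pvHit num dayOff args i) := by
  intro l
  cases l with
  | nil => rfl
  | cons i rest =>
    simp only [pvLoopA, List.tail_cons]
    by_cases hp : (PySem.List.slice args (some i) (some (i + num))).sum = dayOff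
    · simp [hp, pvLoopA_true_ge_one num dayOff args rest 1 le_rfl]
    · simp [hp, pvLoopA_true_ge_one num dayOff args rest 1 le_rfl]

theorem pv_foldl_min_eq_left (a : Int) (t : List Int) (h : ∀ x ∈ t, a ≤ x) :
    t.foldl min a = a := by
  induction t with
  | nil => rfl
  | cons x xs ih =>
    have hax : a ≤ x := h x (by simp)
    simp only [List.foldl_cons, min_eq_left hax]
    exact ih (fun y hy => h y (by simp [hy]))

theorem pv_foldl_max_le_iff (a m : Int) (t : List Int) :
    t.foldl max a ≤ m ↔ a ≤ m ∧ ∀ x ∈ t, x ≤ m := by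
  induction t generalizing a with
  | nil => simp
  | cons x xs ih =>
    simp only [List.foldl_cons, ih, max_le_iff, List.mem_cons]
    constructor
    · rintro ⟨⟨h1, h2⟩, h3⟩
      exact ⟨h1, fun y hy => hy.elim (fun e => e ▸ h2) (h3 y)⟩
    · rintro ⟨h1, h2⟩
      exact ⟨⟨h1, h2 x (Or.inl rfl)⟩, fun y hy => h2 y (Or.inr hy)⟩

-- the arithmetic-progression index list
def pvProg (a s : Int) (n : Nat) : List Int := (List.range n).map (fun k : Nat => a + s * (k : Int))

theorem pvProg_succ (a s : Int) (n : Nat) :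
    pvProg a s (n + 1) = a :: pvProg (a + s) s n := by
  unfold pvProg
  rw [List.range_succ_eq_map, List.map_cons, List.map_map]
  refine congrArg₂ List.cons (by simp) ?_
  apply List.map_congr_left
  intro k _
  simp only [Function.comp_apply]
  push_cast
  ring

theorem pvProg_mem_le (a s : Int) (hs : 0 ≤ s) (n : Nat) :
    ∀ x ∈ pvProg a s n, a ≤ x := by
  intro x hx
  simp only [pvProg, List.mem_map] at hx
  obtain ⟨k, _, rfl⟩ := hx
  have : 0 ≤ s * (k : Int) := mul_nonneg hs (Int.natCast_nonneg k)
  omega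

theorem pvSpan_cons_min (num a : Int) (t : List Int) (hta : ∀ x ∈ t, a ≤ x) :
    pvSpan num (a :: t) = decide (t.foldl max a - a ≤ num) := by
  simp only [pvSpan, PySem.List.max?_id_cons, PySem.List.min?_id_cons,
    pv_foldl_min_eq_left a t hta]

-- the main invariant: on an arithmetic progression with step num > 0 and begin not yet set,
-- A's loop equals B's span test of the matching indices
theorem pv_main (num dayOff : Int) (args : List Int) (hnum : 0 < num) :
    ∀ (n : Nat) (a : Int),
      pvLoopA num dayOff args (pvProg a num n) false 0 =
        pvSpan num ((pvProg a num n).filter (fun j => pvHit num dayOff args j)) := by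
  intro n
  induction n with
  | zero => intro a; rfl
  | succ n ih =>
    intro a
    rw [pvProg_succ]
    by_cases hp : (PySem.List.slice args (some a) (some (a + num))).sum = dayOff
    · -- head chunk matches: begin is set here
      have hhit : pvHit num dayOff args a = true := by simp [pvHit, hp]
      have hstep : pvLoopA num dayOff args (a :: pvProg (a + num) num n) false 0 =
          pvLoopA num dayOff args (pvProg (a + num) num n) true 0 := by
        simp [pvLoopA, hp]
      rw [hstep, pvLoopA_true_zero, List.filter_cons, hhit, if_pos rfl]
      set t := (pvProg (a + num) num n).filter (fun j => pvHit num dayOff args j) with ht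
      have hta : ∀ x ∈ t, a ≤ x := by
        intro x hx
        have hx' : x ∈ pvProg (a + num) num n := List.mem_of_mem_filter hx
        have := pvProg_mem_le (a + num) num (le_of_lt hnum) n x hx'
        omega
      rw [pvSpan_cons_min num a t hta]
      have hiff : (t.foldl max a - a ≤ num) ↔ (∀ x ∈ t, x ≤ a + num) := by
        rw [show (t.foldl max a - a ≤ num) ↔ t.foldl max a ≤ a + num by omega,
            pv_foldl_max_le_iff]
        exact ⟨fun h => h.2, fun h => ⟨by omega, h⟩⟩
      cases n with
      | zero =>
        have : t = [] := by simp [ht, pvProg]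
        simp [this, pvProg]
        omega
      | succ m =>
        rw [pvProg_succ] at ht
        have h2 : ∀ x ∈ pvProg (a + num + num) num m, a + num < x := by
          intro x hx
          have := pvProg_mem_le (a + num + num) num (le_of_lt hnum) m x hx
          omega
        rw [pvProg_succ, List.tail_cons]
        set t2 := (pvProg (a + num + num) num m).filter (fun j => pvHit num dayOff args j) with ht2
        have ht' : t = if pvHit num dayOff args (a + num) = true then (a + num) :: t2 else t2 := by
          rw [ht, List.filter_cons]
        have key : (t.foldl max a - a ≤ num) ↔ ∀ x ∈ t2, x ≤ a + num := by
          rw [hiff, ht']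
          by_cases hh : pvHit num dayOff args (a + num) = true
          · simp only [hh, if_pos]
            constructor
            · intro h x hx; exact h x (List.mem_cons_of_mem _ hx)
            · intro h x hx
              rcases List.mem_cons.mp hx with rfl | hx'
              · omega
              · exact h x hx'
          · rw [if_neg hh]
        rw [show (decide (t.foldl max a - a ≤ num)) = decide (∀ x ∈ t2, x ≤ a + num) from
          (decide_eq_decide).mpr key]
        -- both sides now say: no chunk at distance >= 2 from the first match
        rcases Bool.eq_false_or_eq_true
          ((pvProg (a + num + num) num m).all (fun i => !pvHit num dayOff args i)) with hall | hall
        · rw [hall]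
          symm
          rw [decide_eq_true_iff]
          intro x hx
          exfalso
          have hxm := List.mem_of_mem_filter hx
          have hxp : pvHit num dayOff args x = true := by
            simpa using (List.mem_filter.mp hx).2
          simp only [List.all_eq_true, Bool.not_eq_true'] at hall
          rw [hall x hxm] at hxp
          exact Bool.false_ne_true hxp
        · rw [hall]
          symm
          rw [decide_eq_false_iff_not]
          intro hle
          rw [List.all_eq_false] at hall
          obtain ⟨y, hy, hpy⟩ := hall
          have hmem : y ∈ t2 := List.mem_filter.mpr ⟨hy, by simpa using hpy⟩
          have := hle y hmem
          have := h2 y hy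
          omega
    · -- head chunk does not match: state unchanged
      have hhit : pvHit num dayOff args a = false := by simp [pvHit, hp]
      have hstep : pvLoopA num dayOff args (a :: pvProg (a + num) num n) false 0 =
          pvLoopA num dayOff args (pvProg (a + num) num n) false 0 := by
        simp [pvLoopA, hp]
      rw [hstep, List.filter_cons, hhit]
      simpa using ih (a + num)

theorem pv_pyRange_neg (len s : Int) (hlen : 0 ≤ len) (hs : s < 0) :
    PySem.List.pyRange 0 len s = [] := by
  simp only [PySem.List.pyRange]
  rw [if_neg (by omega)]
  simp only [show ¬(0 < s) by omega, if_false, show ¬(len < 0) by omega]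
  simp

-- ===== VERDICT (by name: the statement is the Claim_ definition above) =====
theorem check_minimum_consecutive_spec : Claim_equal_check_minimum_consecutive := by
  intro num dayOff args _ hpre
  unfold Spec_check_minimum_consecutive check_minimum_consecutive check_minimum_consecutive_alt
  rcases lt_trichotomy num 0 with hneg | hz | hpos
  · rw [pv_pyRange_neg (PySem.List.len args) num (by simp [PySem.List.len_eq]) hneg]
    rfl
  · exact absurd hz hpre
  · rw [PySem.List.pyRange_of_pos 0 (PySem.List.len args) hpos]
    exact pv_main num dayOff args hpos _ 0
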